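-- pv_equiv track=rewrite | github.com/taechanha/PS | 2019-카카오-겨울인턴십/징검다리건너기.py | count_continuous_zeros
-- ===== SOURCE A (Python) =====
-- def count_continuous_zeros(zeros_idx):
--     # [0, 3, 4, 5, 7, 9]
--     max_cnt, cnt = 1, 1
--     for i in range(len(zeros_idx) - 1):
--         if zeros_idx[i]+1 == zeros_idx[i+1]:
--             cnt += 1
--             max_cnt = max(max_cnt, cnt)
--         else:
--             cnt = 1
--
--     return max_cnt
-- ===== SOURCE B (Python) =====
-- def count_continuous_zeros(zeros_idx):
--     # Run-length decomposition: the key v - i is constant exactly on a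
--     # maximal run of consecutive values, so group equal adjacent keys,
--     # collect the group lengths, and take their max (default 1).
--     keys = [v - i for i, v in enumerate(zeros_idx)]
--     lengths = []
--     prev = None
--     for k in keys:
--         if lengths and k == prev:
--             lengths[-1] += 1
--         else:
--             lengths.append(1)
--         prev = k
--     return max(lengths, default=1)
-- ===== Notes on version B (the rewrite author's own statement) =====
-- stated objective: alternative
-- what changed: Replaces the online (max,cnt) adjacent-index scan with a run-length decomposition: map each element to the shift key v-i (constant on a consecutive run), build the list of lengths of maximal equal-key groups, and return its max with default 1.
import Mathlib
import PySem

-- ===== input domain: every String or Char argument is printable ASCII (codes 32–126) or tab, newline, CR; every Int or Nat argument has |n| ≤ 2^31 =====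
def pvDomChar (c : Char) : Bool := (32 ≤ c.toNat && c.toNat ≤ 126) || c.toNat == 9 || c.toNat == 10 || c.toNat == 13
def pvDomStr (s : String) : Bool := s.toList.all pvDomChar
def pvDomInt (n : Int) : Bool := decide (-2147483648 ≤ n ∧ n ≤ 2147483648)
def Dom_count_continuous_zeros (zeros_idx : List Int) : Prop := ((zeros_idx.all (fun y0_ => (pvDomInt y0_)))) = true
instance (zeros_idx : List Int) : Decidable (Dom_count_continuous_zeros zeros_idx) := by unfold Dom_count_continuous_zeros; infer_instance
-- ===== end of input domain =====

-- B replaces A's online (max,cnt) adjacent-index scan by a run-length decomposition over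
-- the shift keys v - i (grouping equal adjacent keys and maxing the group lengths); same cost.


-- ===== PORT A =====
-- for i in range(len(zeros_idx)-1): compare zeros_idx[i]+1 with zeros_idx[i+1], keep (max_cnt, cnt)
def count_continuous_zeros (zeros_idx : List Int) : Int :=
  ((PySem.List.pyRange 0 ((zeros_idx.length : Int) - 1) 1).foldl
    (fun (st : Int × Int) i =>
      if PySem.List.pyGetD zeros_idx i 0 + 1 = PySem.List.pyGetD zeros_idx (i + 1) 0 then
        (max st.1 (st.2 + 1), st.2 + 1)
      else
        (st.1, 1))
    (1, 1)).1

-- ===== PORT B =====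
-- lengths[-1] += 1  (only called on a nonempty list)
def pvIncLast (l : List Int) : List Int := l.dropLast ++ [l.getLast?.getD 0 + 1]

def count_continuous_zeros_alt (zeros_idx : List Int) : Int :=
  let keys := (PySem.List.enumerate zeros_idx 0).map (fun p => p.2 - p.1)
  let st := keys.foldl
    (fun (st : List Int × Option Int) k =>
      if st.1 ≠ [] ∧ st.2 = some k then (pvIncLast st.1, some k)
      else (st.1 ++ [1], some k))
    ([], none)
  PySem.List.maxD st.1 (fun x => x) 1

-- ===== PRECONDITION & SPEC =====
def Spec_count_continuous_zeros (zeros_idx : List Int) (out : Int) : Prop := out = count_continuous_zeros_alt zeros_idx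
instance (zeros_idx : List Int) (out : Int) : Decidable (Spec_count_continuous_zeros zeros_idx out) := by unfold Spec_count_continuous_zeros; infer_instance

-- ===== CLAIM (what is proved, stated in full; the proofs are below) =====
def Claim_equal_count_continuous_zeros : Prop := ∀ (zeros_idx : List Int), Dom_count_continuous_zeros zeros_idx → Spec_count_continuous_zeros zeros_idx (count_continuous_zeros zeros_idx)

-- ===== LEMMAS AND PROOFS =====

-- A's loop step, as a function of the comparison outcome only
def pvAStep (st : Int × Int) (b : Bool) : Int × Int :=
  if b then (max st.1 (st.2 + 1), st.2 + 1) else (st.1, 1)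

-- B's loop step on the lengths list, as a function of the comparison outcome only
def pvBStep (L : List Int) (b : Bool) : List Int :=
  if b then pvIncLast L else L ++ [1]

-- the list of adjacent comparison outcomes A reads
def pvBools (xs : List Int) : List Bool :=
  (xs.zip xs.tail).map (fun p => decide (p.1 + 1 = p.2))

-- adjacent-equality outcomes of a key list
def pvAdjB (l : List Int) : List Bool :=
  (l.zip l.tail).map (fun q => decide (q.1 = q.2))

-- running max with floor 1
def pvM (L : List Int) : Int := L.foldl max 1

lemma pvM_concat (l : List Int) (y : Int) : pvM (l ++ [y]) = max (pvM l) y := by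
  simp [pvM, List.foldl_append]

lemma pv_one_le_M (l : List Int) : 1 ≤ pvM l := (PySem.List.le_foldl_max l 1).1

lemma pv_zip_eq_range_map (xs : List Int) :
    (PySem.List.pyRange 0 ((xs.length : Int) - 1) 1).map
      (fun i => (PySem.List.pyGetD xs i 0, PySem.List.pyGetD xs (i + 1) 0))
      = xs.zip xs.tail := by
  apply List.ext_getElem
  · simp [PySem.List.length_pyRange_one]
  · intro k h1 h2
    have hk : k + 1 < xs.length := by
      simp [List.length_zip] at h2
      omega
    rw [List.getElem_map, PySem.List.getElem_pyRange_one, List.getElem_zip, List.getElem_tail]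
    have e1 : PySem.List.pyGetD xs ((0 : Int) + (k : Int)) 0 = xs[k] := by
      rw [zero_add, PySem.List.pyGetD_natCast, List.getD_eq_getElem xs 0 (by omega)]
    have e2 : PySem.List.pyGetD xs ((0 : Int) + (k : Int) + 1) 0 = xs[k + 1] := by
      rw [show (0 : Int) + (k : Int) + 1 = ((k + 1 : Nat) : Int) by push_cast; ring,
        PySem.List.pyGetD_natCast, List.getD_eq_getElem xs 0 (by omega)]
    rw [e1, e2]

-- A equals the fold of pvAStep over the comparison outcomes
lemma pv_A_eq (xs : List Int) :
    count_continuous_zeros xs = ((pvBools xs).foldl pvAStep (1, 1)).1 := by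
  unfold count_continuous_zeros pvBools
  rw [← pv_zip_eq_range_map, List.foldl_map, List.foldl_map]
  congr 1
  have hfun : (fun (st : Int × Int) (i : Int) =>
      if PySem.List.pyGetD xs i 0 + 1 = PySem.List.pyGetD xs (i + 1) 0 then
        (max st.1 (st.2 + 1), st.2 + 1) else (st.1, 1))
      = (fun (st : Int × Int) (i : Int) => pvAStep st
          (decide ((PySem.List.pyGetD xs i 0, PySem.List.pyGetD xs (i + 1) 0).1 + 1
            = (PySem.List.pyGetD xs i 0, PySem.List.pyGetD xs (i + 1) 0).2))) := by
    funext st i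
    by_cases h : PySem.List.pyGetD xs i 0 + 1 = PySem.List.pyGetD xs (i + 1) 0 <;> simp [pvAStep, h]
  rw [hfun]

-- B's key fold with a known previous key is pvBStep over the adjacent outcomes
lemma pv_kfold_eq (ks : List Int) : ∀ (p : Int) (L : List Int), L ≠ [] →
    (ks.foldl
      (fun (st : List Int × Option Int) k =>
        if st.1 ≠ [] ∧ st.2 = some k then (pvIncLast st.1, some k)
        else (st.1 ++ [1], some k))
      (L, some p)).1 = (pvAdjB (p :: ks)).foldl pvBStep L := by
  induction ks with
  | nil => intro p L _; simp [pvAdjB]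
  | cons k t ih =>
    intro p L hL
    have hstep : (if L ≠ [] ∧ (some p : Option Int) = some k then (pvIncLast L, some k)
        else (L ++ [1], some k)) = (pvBStep L (decide (p = k)), some k) := by
      by_cases h : p = k <;> simp [pvBStep, h, hL]
    have hadj : pvAdjB (p :: k :: t) = decide (p = k) :: pvAdjB (k :: t) := by
      simp [pvAdjB]
    rw [List.foldl_cons, hstep, hadj, List.foldl_cons]
    apply ih k
    by_cases h : p = k <;> simp [h, pvBStep, pvIncLast]

-- the adjacent-equality outcomes of the shift keys are A's comparison outcomes
lemma pv_keys_adj (xs : List Int) : ∀ (s : Int),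
    pvAdjB ((PySem.List.enumerate xs s).map (fun p => p.2 - p.1)) = pvBools xs := by
  induction xs with
  | nil => intro s; simp [pvAdjB, pvBools, PySem.List.enumerate]
  | cons x rest ih =>
    intro s
    cases rest with
    | nil => simp [pvAdjB, pvBools, PySem.List.enumerate]
    | cons y t =>
      have hd : decide (x - s = y - (s + 1)) = decide (x + 1 = y) :=
        decide_eq_decide.mpr (by omega)
      have := ih (s + 1)
      simp only [PySem.List.enumerate_cons, List.map_cons, pvAdjB, pvBools, List.zip_cons_cons,
        List.tail_cons, List.map_cons] at this ⊢
      rw [hd, this]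

-- core invariant: A's (max, cnt) state mirrors B's lengths list
lemma pv_inv (bs : List Bool) : ∀ (m : Int) (L : List Int), L ≠ [] → (∀ x ∈ L, 1 ≤ x) →
    bs.foldl pvAStep (max m (pvM L), L.getLast?.getD 0)
      = (max m (pvM (bs.foldl pvBStep L)), (bs.foldl pvBStep L).getLast?.getD 0) := by
  induction bs with
  | nil => intro m L _ _; rfl
  | cons b t ih =>
    intro m L hL hpos
    obtain ⟨l', y, h⟩ := List.eq_nil_or_concat L |>.resolve_left hL
    rw [List.concat_eq_append] at h
    subst h
    have hlast : (l' ++ [y]).getLast?.getD 0 = y := by rw [List.getLast?_concat]; rfl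
    have hy : 1 ≤ y := hpos y (by simp)
    cases b with
    | false =>
      rw [List.foldl_cons, List.foldl_cons,
        show pvBStep (l' ++ [y]) false = (l' ++ [y]) ++ [1] from rfl,
        show pvAStep (max m (pvM (l' ++ [y])), (l' ++ [y]).getLast?.getD 0) false
          = (max m (pvM (l' ++ [y])), 1) from rfl]
      have hpair : (max m (pvM (l' ++ [y])), (1 : Int))
          = (max m (pvM ((l' ++ [y]) ++ [1])), ((l' ++ [y]) ++ [1]).getLast?.getD 0) := by
        have hM : pvM ((l' ++ [y]) ++ [1]) = pvM (l' ++ [y]) := by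
          rw [pvM_concat]
          have := pv_one_le_M (l' ++ [y])
          omega
        rw [hM, List.getLast?_concat]
        rfl
      rw [hpair]
      exact ih m ((l' ++ [y]) ++ [1]) (by simp) (by
        intro x hx
        rcases List.mem_append.mp hx with h | h
        · exact hpos x h
        · simp at h; omega)
    | true =>
      have hBs : pvBStep (l' ++ [y]) true = l' ++ [y + 1] := by
        show pvIncLast (l' ++ [y]) = l' ++ [y + 1]
        rw [pvIncLast, List.dropLast_concat, List.getLast?_concat]
        rfl
      rw [List.foldl_cons, List.foldl_cons, hBs,
        show pvAStep (max m (pvM (l' ++ [y])), (l' ++ [y]).getLast?.getD 0) true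
          = (max (max m (pvM (l' ++ [y]))) ((l' ++ [y]).getLast?.getD 0 + 1),
             (l' ++ [y]).getLast?.getD 0 + 1) from rfl]
      have hpair : (max (max m (pvM (l' ++ [y]))) ((l' ++ [y]).getLast?.getD 0 + 1),
            (l' ++ [y]).getLast?.getD 0 + 1)
          = (max m (pvM (l' ++ [y + 1])), (l' ++ [y + 1]).getLast?.getD 0) := by
        have e2 : (l' ++ [y + 1]).getLast?.getD 0 = y + 1 := by rw [List.getLast?_concat]; rfl
        rw [hlast, e2, pvM_concat, pvM_concat]
        simp only [Prod.mk.injEq]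
        exact ⟨by omega, trivial⟩
      rw [hpair]
      exact ih m (l' ++ [y + 1]) (by simp) (by
        intro x hx
        rcases List.mem_append.mp hx with h | h
        · exact hpos x (List.mem_append.mpr (Or.inl h))
        · simp at h; omega)

-- Python max(lengths) of a positive nonempty list is the floored running max
lemma pv_maxD_eq (L : List Int) (hL : L ≠ []) (hpos : ∀ x ∈ L, 1 ≤ x) :
    PySem.List.maxD L (fun x => x) 1 = max 1 (pvM L) := by
  obtain ⟨x, t, rfl⟩ := List.exists_cons_of_ne_nil hL
  have hx : 1 ≤ x := hpos x (by simp)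
  have h1 : PySem.List.maxD (x :: t) (fun y => y) 1 = t.foldl max x := by
    unfold PySem.List.maxD
    rw [PySem.List.max?_id_cons]
    rfl
  have h2 : pvM (x :: t) = t.foldl max x := by
    rw [pvM, List.foldl_cons, show max 1 x = x by omega]
  rw [h1, h2]
  have := (PySem.List.le_foldl_max t x).1
  omega

-- positivity of the lengths list is preserved by the whole fold
lemma pv_bfold_pos (bs : List Bool) : ∀ (L : List Int), L ≠ [] → (∀ x ∈ L, 1 ≤ x) →
    (bs.foldl pvBStep L) ≠ [] ∧ ∀ x ∈ bs.foldl pvBStep L, 1 ≤ x := by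
  induction bs with
  | nil => intro L hL hpos; exact ⟨hL, hpos⟩
  | cons b t ih =>
    intro L hL hpos
    obtain ⟨l', y, h⟩ := List.eq_nil_or_concat L |>.resolve_left hL
    rw [List.concat_eq_append] at h
    subst h
    have hy : 1 ≤ y := hpos y (by simp)
    cases b with
    | false =>
      rw [List.foldl_cons, show pvBStep (l' ++ [y]) false = (l' ++ [y]) ++ [1] from rfl]
      exact ih _ (by simp) (by
        intro x hx
        rcases List.mem_append.mp hx with h | h
        · exact hpos x h
        · simp at h; omega)
    | true =>
      have hBs : pvBStep (l' ++ [y]) true = l' ++ [y + 1] := by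
        show pvIncLast (l' ++ [y]) = l' ++ [y + 1]
        rw [pvIncLast, List.dropLast_concat, List.getLast?_concat]
        rfl
      rw [List.foldl_cons, hBs]
      exact ih _ (by simp) (by
        intro x hx
        rcases List.mem_append.mp hx with h | h
        · exact hpos x (List.mem_append.mpr (Or.inl h))
        · simp at h; omega)

-- ===== VERDICT (by name: the statement is the Claim_ definition above) =====
theorem count_continuous_zeros_spec : Claim_equal_count_continuous_zeros := by
  intro xs _
  unfold Spec_count_continuous_zeros
  cases xs with
  | nil => decide
  | cons x rest =>
    -- B's value
    have hB : count_continuous_zeros_alt (x :: rest)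
        = PySem.List.maxD ((pvBools (x :: rest)).foldl pvBStep [1]) (fun v => v) 1 := by
      unfold count_continuous_zeros_alt
      simp only [PySem.List.enumerate_cons, List.map_cons, List.foldl_cons]
      rw [if_neg (by simp), List.nil_append, pv_kfold_eq _ (x - 0) [1] (by simp)]
      have := pv_keys_adj (x :: rest) 0
      simp only [PySem.List.enumerate_cons, List.map_cons] at this
      rw [this]
    -- A's value
    have hA : count_continuous_zeros (x :: rest)
        = max 1 (pvM ((pvBools (x :: rest)).foldl pvBStep [1])) := by
      rw [pv_A_eq]
      have h1 : ((1 : Int), (1 : Int)) = (max 1 (pvM [1]), ([1] : List Int).getLast?.getD 0) := by decide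
      rw [h1, pv_inv (pvBools (x :: rest)) 1 [1] (by simp) (by simp)]
    obtain ⟨hne, hpos⟩ := pv_bfold_pos (pvBools (x :: rest)) [1] (by simp) (by simp)
    rw [hA, hB, pv_maxD_eq _ hne hpos]
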